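-- pv_equiv track=rewrite | github.com/growbori/codetree-TILs | 241009/고대 문명 유적 탐사/ancient-ruin-exploration.py | find_you
-- ===== SOURCE A (Python) =====
-- def bfs(arr, v, si, sj, clr):
--     q = []
--     q.append((si, sj))
--     fset = set()
--     fset.add((si, sj))
--     v[si][sj] = 1
--     cnt = 0
--     cnt += 1
--     while q:
--         ci, cj = q.pop(0)
--         for di, dj in ((-1, 0), (0, 1), (1, 0), (0, -1)):
--             ni, nj = ci + di, cj + dj
--             if 0 <= ni < 5 and 0 <= nj < 5 and v[ni][nj] == 0 and arr[ci][cj] == arr[ni][nj]: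
--                 q.append((ni, nj))
--                 cnt += 1
--                 fset.add((ni, nj))
--                 v[ni][nj] = 1
--
--     if cnt >= 3:
--         if clr == 1:
--             for i, j in fset:   # 유물 탐사를 성공한 곳이면 칸을 0으로 바꿔준다!
--                 arr[i][j] = 0
--         return cnt
--     else:
--         return 0
--
-- def find_you(arr, clr):
--     v = [[0] * 5 for _ in range(5)] # 먼저 주어주기! 침착하자!
--     cnt = 0
--     for i in range(5):
--         for j in range(5):
--             if v[i][j] == 0:
--                 t = bfs(arr, v, i, j, clr)
--                 cnt += t
--     return cnt
-- ===== SOURCE B (Python) =====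
-- # B: union-find (DSU) over the 25 grid cells instead of per-region BFS:
-- # one union pass over right/down equal-value neighbours, then count the
-- # cells lying in components of size >= 3; clearing is one final pass.
-- def find_you(arr, clr):
--     parent = list(range(25))
--
--     def find(x):
--         while parent[x] != x:
--             x = parent[x]
--         return x
--
--     def union(a, b):
--         ra, rb = find(a), find(b)
--         if ra < rb:
--             parent[rb] = ra
--         elif rb < ra:
--             parent[ra] = rb
--
--     for i in range(5):
--         for j in range(5):
--             k = 5 * i + j
--             if i < 4 and arr[i][j] == arr[i + 1][j]:
--                 union(k, k + 5)
--             if j < 4 and arr[i][j] == arr[i][j + 1]: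
--                 union(k, k + 1)
--
--     roots = [find(k) for k in range(25)]
--     big = [k for k in range(25) if roots.count(roots[k]) >= 3]
--     if clr == 1:
--         for k in big:
--             arr[k // 5][k % 5] = 0
--     return len(big)
-- ===== Notes on version B (the rewrite author's own statement) =====
-- stated objective: idiomatic
-- what changed: A runs a queue-based BFS per unvisited cell with a shared 5x5 visited mask and clears each qualifying region mid-scan; B instead builds a union-find over the 25 cells with one union pass over equal-valued right/down neighbours, then counts the cells whose component has size >= 3 (equal to A's sum of qualifying component sizes) and defers all clearing to one final pass.
import Mathlib
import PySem

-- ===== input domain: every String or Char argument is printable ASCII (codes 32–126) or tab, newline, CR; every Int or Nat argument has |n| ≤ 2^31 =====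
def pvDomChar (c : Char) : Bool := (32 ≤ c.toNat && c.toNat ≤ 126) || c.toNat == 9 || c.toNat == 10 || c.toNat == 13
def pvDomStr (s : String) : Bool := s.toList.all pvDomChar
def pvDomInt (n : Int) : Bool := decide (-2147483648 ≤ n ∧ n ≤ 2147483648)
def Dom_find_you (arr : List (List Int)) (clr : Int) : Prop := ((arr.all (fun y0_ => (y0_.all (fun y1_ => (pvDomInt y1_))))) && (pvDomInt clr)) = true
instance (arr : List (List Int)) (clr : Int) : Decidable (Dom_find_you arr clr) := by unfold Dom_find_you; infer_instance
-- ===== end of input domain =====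

set_option maxRecDepth 8192
set_option maxHeartbeats 2000000

-- B replaces A's per-region BFS (shared visited mask, mid-scan clearing) by a
-- union-find over the 25 cells: one union pass over equal-valued right/down
-- neighbours, then a count of the cells whose component has size >= 3; objective:
-- idiomatic.  A mutates arr in place when clr == 1 (B's Python performs the same
-- mutation); the equivalence proved here is about the RETURN value only.

-- ===== PORT A =====
-- arr[i][j] with Int indices; exact under Pre_ (all indices used are in range and nonnegative)
def pvIGet (a : List (List Int)) (i j : Int) : Int :=
  (a.getD i.toNat []).getD j.toNat 0
-- arr[i][j] = x; exact under Pre_ (indices in range, nonnegative)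
def pvISet (a : List (List Int)) (i j : Int) (x : Int) : List (List Int) :=
  a.set i.toNat ((a.getD i.toNat []).set j.toNat x)
-- v = [[0] * 5 for _ in range(5)]
def pvZeros5 : List (List Int) := (List.range 5).map (fun _ => List.replicate 5 (0 : Int))
-- ((-1, 0), (0, 1), (1, 0), (0, -1))
def pvDirsA : List (Int × Int) := [(-1, 0), (0, 1), (1, 0), (0, -1)]

-- body of `for di, dj in …` inside the while loop
def pvStep (arr : List (List Int)) (ci cj : Int)
    (st : List (List Int) × List (Int × Int) × PySem.Set (Int × Int) × Int) (d : Int × Int) :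
    List (List Int) × List (Int × Int) × PySem.Set (Int × Int) × Int :=
  let ni := ci + d.1
  let nj := cj + d.2
  if 0 ≤ ni ∧ ni < 5 ∧ 0 ≤ nj ∧ nj < 5 ∧ pvIGet st.1 ni nj = 0 ∧ pvIGet arr ci cj = pvIGet arr ni nj then
    (pvISet st.1 ni nj 1, st.2.1 ++ [(ni, nj)], PySem.Set.add st.2.2.1 (ni, nj), st.2.2.2 + 1)
  else st

-- `while q:` — fuel-bounded; fuel 25 suffices (proved: at most one pop per enqueue, ≤ 25 enqueues)
def pvBfsGo : Nat → List (List Int) → List (List Int) → List (Int × Int) →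
    PySem.Set (Int × Int) → Int → List (List Int) × PySem.Set (Int × Int) × Int
  | 0, _, v, _, fset, cnt => (v, fset, cnt)
  | fuel + 1, arr, v, q, fset, cnt =>
    match q with
    | [] => (v, fset, cnt)
    | (ci, cj) :: q' =>
      let r := pvDirsA.foldl (pvStep arr ci cj) (v, q', fset, cnt)
      pvBfsGo fuel arr r.1 r.2.1 r.2.2.1 r.2.2.2

-- bfs(arr, v, si, sj, clr); returns (arr, v, return value); the `for i, j in fset` clearing
-- loop is ported as a fold over the Set's list (every cell is set to 0, so order cannot matter)
def pvBfs (arr v : List (List Int)) (si sj clr : Int) :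
    List (List Int) × List (List Int) × Int :=
  let q : List (Int × Int) := [] ++ [(si, sj)]
  let fset : PySem.Set (Int × Int) := PySem.Set.add PySem.Set.empty (si, sj)
  let v1 := pvISet v si sj 1
  let cnt : Int := 0 + 1
  let r := pvBfsGo 25 arr v1 q fset cnt
  if 3 ≤ r.2.2 then
    if clr = 1 then ((r.2.1 : List (Int × Int)).foldl (fun a p => pvISet a p.1 p.2 0) arr, r.1, r.2.2)
    else (arr, r.1, r.2.2)
  else (arr, r.1, 0)

def find_you (arr : List (List Int)) (clr : Int) : Int :=
  let st := (List.range 5).foldl (fun st i =>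
    (List.range 5).foldl (fun st j =>
      if pvIGet st.2.1 (i : Int) (j : Int) = 0 then
        let r := pvBfs st.1 st.2.1 (i : Int) (j : Int) clr
        (r.1, r.2.1, st.2.2 + r.2.2)
      else st) st) (arr, pvZeros5, (0 : Int))
  st.2.2

-- ===== PORT B =====
-- arr[i][j] with Nat indices (in range under Pre_)
def pvBGet (arr : List (List Int)) (i j : Nat) : Int := (arr.getD i []).getD j 0

-- `while parent[x] != x: x = parent[x]` — fuel-bounded; fuel 25 suffices because
-- parent pointers always point to a strictly smaller index
def dsuFind (p : List Int) : Nat → Int → Int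
  | 0, x => x
  | fuel + 1, x =>
    let y := p.getD x.toNat 0
    if y = x then x else dsuFind p fuel y

-- union(a, b): link the larger root below the smaller
def dsuUnion (p : List Int) (a b : Int) : List Int :=
  let ra := dsuFind p 25 a
  let rb := dsuFind p 25 b
  if ra < rb then p.set rb.toNat ra
  else if rb < ra then p.set ra.toNat rb
  else p

-- clr = 1 only triggers the in-place clearing of arr in Source B, which does not
-- affect the return value
def find_you_alt (arr : List (List Int)) (clr : Int) : Int :=
  let p0 : List Int := (List.range 25).map (fun k => (k : Int))
  let p := (List.range 5).foldl (fun p (i : Nat) =>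
    (List.range 5).foldl (fun p (j : Nat) =>
      let k : Int := 5 * (i : Int) + (j : Int)
      let p1 := if i < 4 ∧ pvBGet arr i j = pvBGet arr (i + 1) j then dsuUnion p k (k + 5) else p
      if j < 4 ∧ pvBGet arr i j = pvBGet arr i (j + 1) then dsuUnion p1 k (k + 1) else p1) p) p0
  let roots := (List.range 25).map (fun k => dsuFind p 25 (k : Int))
  let big := (List.range 25).filter (fun k => 3 ≤ roots.count (roots.getD k 0))
  (big.length : Int)

-- ===== PRECONDITION & SPEC =====
-- Pre_: the Python A indexes arr[i][j] for all 0 ≤ i, j < 5 and raises IndexError otherwise;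
-- it returns normally exactly when arr has at least 5 rows whose first 5 each have length ≥ 5.
def Pre_find_you (arr : List (List Int)) (clr : Int) : Prop :=
  5 ≤ arr.length ∧ ∀ r ∈ arr.take 5, 5 ≤ r.length
instance (arr : List (List Int)) (clr : Int) : Decidable (Pre_find_you arr clr) := by
  unfold Pre_find_you; infer_instance

def pvWitness_find_you : List (List Int) × Int :=
  ([[1, 1, 1, 0, 0], [0, 2, 0, 0, 0], [0, 2, 0, 0, 0], [0, 2, 0, 0, 0], [0, 0, 0, 0, 0]], 1)

def Spec_find_you (arr : List (List Int)) (clr : Int) (out : Int) : Prop := out = find_you_alt arr clr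
instance (arr : List (List Int)) (clr : Int) (out : Int) : Decidable (Spec_find_you arr clr out) := by
  unfold Spec_find_you; infer_instance

-- ===== CLAIM (what is proved, stated in full; the proofs are below) =====
def Claim_equal_find_you : Prop := ∀ (arr : List (List Int)) (clr : Int), Dom_find_you arr clr → Pre_find_you arr clr → Spec_find_you arr clr (find_you arr clr)

-- ===== LEMMAS AND PROOFS =====
-- ---------- grid helpers ----------
-- arr[i][j] viewed at a cell of the 5×5 grid (proof-side)
def pvValC (arr : List (List Int)) (c : Fin 5 × Fin 5) : Int :=
  (arr.getD c.1 []).getD c.2 0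
-- grid adjacency with equal values (proof-side abstraction of both programs)
def pvAdjB (arr : List (List Int)) (c n : Fin 5 × Fin 5) : Bool :=
  (((n.1 : Int) - (c.1 : Int)).natAbs + ((n.2 : Int) - (c.2 : Int)).natAbs == 1) &&
    (pvValC arr n == pvValC arr c)
-- one saturation round of a cell set under pvAdjB
def pvExpandB (arr : List (List Int)) (S : Finset (Fin 5 × Fin 5)) : Finset (Fin 5 × Fin 5) :=
  Finset.univ.filter (fun n => n ∈ S ∨ ∃ c ∈ S, pvAdjB arr c n = true)
-- the equal-value component of a cell (25 rounds saturate)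
def pvCompB (arr : List (List Int)) (s : Fin 5 × Fin 5) : Finset (Fin 5 × Fin 5) :=
  (pvExpandB arr)^[25] {s}

def Grid5 (g : List (List Int)) : Prop := g.length = 5 ∧ ∀ r ∈ g, r.length = 5

def ShapeEq (a b : List (List Int)) : Prop :=
  a.length = b.length ∧ ∀ k, (a.getD k []).length = (b.getD k []).length

theorem getD_set_lt (l : List Int) (m n : Nat) (a d : Int) (h : m < l.length) :
    (l.set m a).getD n d = if n = m then a else l.getD n d := by
  rcases Nat.lt_or_ge n l.length with h2 | h2
  · rw [List.getD_eq_getElem _ _ (by simpa using h2), List.getD_eq_getElem _ _ h2, List.getElem_set]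
    simp [eq_comm]
  · rw [List.getD_eq_default _ _ (by simpa using h2), List.getD_eq_default _ _ h2]
    have : n ≠ m := by omega
    rw [if_neg this]

theorem getD_set_lt' (l : List (List Int)) (m n : Nat) (a : List Int) (h : m < l.length) :
    (l.set m a).getD n [] = if n = m then a else l.getD n [] := by
  rcases Nat.lt_or_ge n l.length with h2 | h2
  · rw [List.getD_eq_getElem _ _ (by simpa using h2), List.getD_eq_getElem _ _ h2, List.getElem_set]
    simp [eq_comm]
  · rw [List.getD_eq_default _ _ (by simpa using h2), List.getD_eq_default _ _ h2]
    have : n ≠ m := by omega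
    rw [if_neg this]

theorem pvIGet_cast (g : List (List Int)) (c : Fin 5 × Fin 5) :
    pvIGet g (c.1 : Int) (c.2 : Int) = pvValC g c := by
  simp [pvIGet, pvValC]

theorem pvValC_pvISet (g : List (List Int)) (c d : Fin 5 × Fin 5) (x : Int)
    (h1 : (c.1 : Nat) < g.length) (h2 : (c.2 : Nat) < (g.getD c.1 []).length) :
    pvValC (pvISet g (c.1 : Int) (c.2 : Int) x) d = if d = c then x else pvValC g d := by
  simp only [pvISet, pvValC, Int.toNat_natCast]
  rw [getD_set_lt' _ _ _ _ h1]
  by_cases hd1 : (d.1 : Nat) = (c.1 : Nat)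
  · rw [if_pos hd1, getD_set_lt _ _ _ _ _ h2]
    by_cases hd2 : (d.2 : Nat) = (c.2 : Nat)
    · have hdc : d = c := Prod.ext_iff.mpr ⟨Fin.ext hd1, Fin.ext hd2⟩
      rw [if_pos hd2, if_pos hdc]
    · have hdc : d ≠ c := fun h => hd2 (by rw [h])
      rw [if_neg hd2, if_neg hdc, hd1]
  · have hdc : d ≠ c := fun h => hd1 (by rw [h])
    rw [if_neg hd1, if_neg hdc]

theorem ShapeEq_pvISet (g b : List (List Int)) (hs : ShapeEq g b) (c : Fin 5 × Fin 5) (x : Int)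
    (h1 : (c.1 : Nat) < g.length) :
    ShapeEq (pvISet g (c.1 : Int) (c.2 : Int) x) b := by
  obtain ⟨hl, hr⟩ := hs
  refine ⟨by simpa [pvISet] using hl, fun k => ?_⟩
  simp only [pvISet, Int.toNat_natCast]
  rw [getD_set_lt' _ _ _ _ h1]
  by_cases hk : k = (c.1 : Nat)
  · rw [if_pos hk, List.length_set, hk, hr]
  · rw [if_neg hk]; exact hr k

theorem Grid5_shape (g : List (List Int)) (hg : Grid5 g) (k : Nat) (hk : k < 5) :
    (g.getD k []).length = 5 := by
  obtain ⟨hl, hr⟩ := hg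
  have : k < g.length := by omega
  rw [List.getD_eq_getElem _ _ this]
  exact hr _ (List.getElem_mem _)

theorem Grid5_pvISet (g : List (List Int)) (hg : Grid5 g) (c : Fin 5 × Fin 5) (x : Int) :
    Grid5 (pvISet g (c.1 : Int) (c.2 : Int) x) := by
  obtain ⟨hl, hr⟩ := hg
  refine ⟨by simp [pvISet, hl], fun r hr' => ?_⟩
  simp only [pvISet] at hr'
  rcases List.mem_or_eq_of_mem_set hr' with h | h
  · exact hr _ h
  · subst h
    rw [List.length_set]
    have : ((c.1 : Int).toNat) < g.length := by rw [Int.toNat_natCast, hl]; exact c.1.isLt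
    rw [List.getD_eq_getElem _ _ this]
    exact hr _ (List.getElem_mem _)

-- ---------- the saturation (pvCompB) theory ----------
theorem pvExpand_subset (arr : List (List Int)) (S : Finset (Fin 5 × Fin 5)) : S ⊆ pvExpandB arr S := by
  intro x hx
  simp only [pvExpandB, Finset.mem_filter, Finset.mem_univ, true_and]
  exact Or.inl hx

theorem pvIter_mono_step (arr : List (List Int)) (X : Finset (Fin 5 × Fin 5)) (k : Nat) :
    (pvExpandB arr)^[k] X ⊆ (pvExpandB arr)^[k + 1] X := by
  rw [Function.iterate_succ_apply']
  exact pvExpand_subset arr _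

theorem pvIter_mono (arr : List (List Int)) (X : Finset (Fin 5 × Fin 5)) {k m : Nat} (h : k ≤ m) :
    (pvExpandB arr)^[k] X ⊆ (pvExpandB arr)^[m] X := by
  induction m with
  | zero => simpa [Nat.le_zero.mp h]
  | succ m ih =>
    rcases Nat.lt_or_ge k (m + 1) with h2 | h2
    · exact (ih (by omega)).trans (pvIter_mono_step arr X m)
    · have : k = m + 1 := by omega
      subst this; exact fun _ h => h

theorem pvIter_stab (arr : List (List Int)) (X : Finset (Fin 5 × Fin 5)) (k : Nat)
    (h : (pvExpandB arr)^[k + 1] X = (pvExpandB arr)^[k] X) :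
    ∀ m, k ≤ m → (pvExpandB arr)^[m] X = (pvExpandB arr)^[k] X := by
  intro m hm
  induction m with
  | zero => simp [Nat.le_zero.mp hm]
  | succ m ih =>
    rcases Nat.lt_or_ge k (m + 1) with h2 | h2
    · have hmk : k ≤ m := by omega
      have h3 := ih hmk
      rw [Function.iterate_succ_apply', h3]
      exact (Function.iterate_succ_apply' (pvExpandB arr) k X).symm.trans h
    · have : k = m + 1 := by omega
      simp [this]

theorem pvComp_fixed (arr : List (List Int)) (s : Fin 5 × Fin 5) :
    pvExpandB arr (pvCompB arr s) = pvCompB arr s := by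
  have hcard : ∃ k < 25, (pvExpandB arr)^[k + 1] {s} = (pvExpandB arr)^[k] {s} := by
    by_contra h
    push_neg at h
    have grow : ∀ k, k ≤ 25 → k + 1 ≤ ((pvExpandB arr)^[k] {s}).card := by
      intro k
      induction k with
      | zero => simp
      | succ k ih =>
        intro hk
        have h1 := h k (by omega)
        have h2 := pvIter_mono_step arr {s} k
        have hss : (pvExpandB arr)^[k] {s} ⊂ (pvExpandB arr)^[k + 1] {s} :=
          ssubset_of_ne_of_subset (fun he => h1 he.symm) h2
        have := Finset.card_lt_card hss
        have := ih (by omega)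
        omega
    have h25 := grow 25 le_rfl
    have hle : ((pvExpandB arr)^[25] ({s} : Finset (Fin 5 × Fin 5))).card ≤ 25 := by
      have := Finset.card_le_univ ((pvExpandB arr)^[25] ({s} : Finset (Fin 5 × Fin 5)))
      simpa using this
    omega
  obtain ⟨k, hk, hfix⟩ := hcard
  have h1 := pvIter_stab arr {s} k hfix 25 (by omega)
  show pvExpandB arr ((pvExpandB arr)^[25] {s}) = (pvExpandB arr)^[25] {s}
  rw [h1]
  exact (Function.iterate_succ_apply' (pvExpandB arr) k {s}).symm.trans hfix

theorem pvComp_self (arr : List (List Int)) (s : Fin 5 × Fin 5) : s ∈ pvCompB arr s :=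
  pvIter_mono arr {s} (Nat.zero_le 25) (by simp)

theorem pvComp_adj (arr : List (List Int)) {s c n : Fin 5 × Fin 5}
    (hc : c ∈ pvCompB arr s) (h : pvAdjB arr c n = true) : n ∈ pvCompB arr s := by
  rw [← pvComp_fixed arr s]
  simp only [pvExpandB, Finset.mem_filter, Finset.mem_univ, true_and]
  exact Or.inr ⟨c, hc, h⟩

theorem pvComp_min (arr : List (List Int)) {s : Fin 5 × Fin 5} {T : Finset (Fin 5 × Fin 5)}
    (hs : s ∈ T) (hcl : ∀ c ∈ T, ∀ n, pvAdjB arr c n = true → n ∈ T) :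
    pvCompB arr s ⊆ T := by
  have : ∀ k, (pvExpandB arr)^[k] {s} ⊆ T := by
    intro k
    induction k with
    | zero => simpa
    | succ k ih =>
      rw [Function.iterate_succ_apply']
      intro x hx
      simp only [pvExpandB, Finset.mem_filter, Finset.mem_univ, true_and] at hx
      rcases hx with hx | ⟨c, hc, hadj⟩
      · exact ih hx
      · exact hcl c (ih hc) x hadj
  exact this 25

theorem pvAdjB_symm (arr : List (List Int)) (c n : Fin 5 × Fin 5) :
    pvAdjB arr c n = pvAdjB arr n c := by
  have h1 : ((n.1 : Int) - (c.1 : Int)).natAbs = ((c.1 : Int) - (n.1 : Int)).natAbs := by omega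
  have h2 : ((n.2 : Int) - (c.2 : Int)).natAbs = ((c.2 : Int) - (n.2 : Int)).natAbs := by omega
  simp only [pvAdjB, h1, h2, Bool.beq_comm]

theorem pvComp_mem_symm (arr : List (List Int)) {s t : Fin 5 × Fin 5}
    (h : t ∈ pvCompB arr s) : s ∈ pvCompB arr t := by
  have : ∀ k, ∀ t : Fin 5 × Fin 5, t ∈ (pvExpandB arr)^[k] {s} → s ∈ pvCompB arr t := by
    intro k
    induction k with
    | zero => intro t ht; simp at ht; subst ht; exact pvComp_self arr t
    | succ k ih =>
      intro t ht
      rw [Function.iterate_succ_apply'] at ht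
      simp only [pvExpandB, Finset.mem_filter, Finset.mem_univ, true_and] at ht
      rcases ht with ht | ⟨c, hc, hadj⟩
      · exact ih t ht
      · have hsc := ih c hc
        have hct : c ∈ pvCompB arr t := pvComp_adj arr (pvComp_self arr t) (by rw [pvAdjB_symm]; exact hadj)
        exact pvComp_min arr hct (fun a ha m hm => pvComp_adj arr ha hm) hsc
  exact this 25 t h

theorem pvComp_eq_of_mem (arr : List (List Int)) {s t : Fin 5 × Fin 5}
    (h : t ∈ pvCompB arr s) : pvCompB arr t = pvCompB arr s := by
  apply Finset.Subset.antisymm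
  · exact pvComp_min arr h (fun a ha m hm => pvComp_adj arr ha hm)
  · exact pvComp_min arr (pvComp_mem_symm arr h) (fun a ha m hm => pvComp_adj arr ha hm)

-- ---------- BFS invariant machinery ----------
def VRep (v : List (List Int)) (Vis : Finset (Fin 5 × Fin 5)) : Prop :=
  Grid5 v ∧ ∀ c, pvValC v c = (if c ∈ Vis then 1 else 0)

theorem VRep_mem {v : List (List Int)} {Vis : Finset (Fin 5 × Fin 5)} (h : VRep v Vis)
    (c : Fin 5 × Fin 5) : c ∈ Vis ↔ pvValC v c ≠ 0 := by
  rw [h.2 c]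
  by_cases hc : c ∈ Vis <;> simp [hc]

theorem pvAdjB_iff (arr : List (List Int)) (c n : Fin 5 × Fin 5) :
    pvAdjB arr c n = true ↔
      ((((n.1 : Int) - (c.1 : Int), (n.2 : Int) - (c.2 : Int)) : Int × Int) ∈ pvDirsA ∧
        pvValC arr n = pvValC arr c) := by
  simp only [pvAdjB, Bool.and_eq_true, beq_iff_eq, pvDirsA, List.mem_cons,
    List.not_mem_nil, or_false, Prod.mk.injEq]
  constructor
  · rintro ⟨h1, h2⟩
    exact ⟨by omega, h2⟩
  · rintro ⟨h1, h2⟩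
    exact ⟨by omega, h2⟩

def BfsInv (arr₀ : List (List Int)) (V₀ : Finset (Fin 5 × Fin 5)) (s : Fin 5 × Fin 5)
    (v : List (List Int)) (Vis : Finset (Fin 5 × Fin 5)) (ql : List (Fin 5 × Fin 5))
    (fset : PySem.Set (Int × Int)) : Prop :=
  VRep v Vis ∧ V₀ ⊆ Vis ∧ s ∈ Vis ∧
  (∀ c ∈ Vis, c ∉ V₀ → c ∈ pvCompB arr₀ s) ∧
  (∀ c ∈ ql, c ∈ Vis ∧ c ∉ V₀) ∧
  (∀ p ∈ fset, ∃ c : Fin 5 × Fin 5, (c ∈ Vis ∧ c ∉ V₀) ∧ p = ((c.1 : Int), (c.2 : Int)))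

def qmap (ql : List (Fin 5 × Fin 5)) : List (Int × Int) :=
  ql.map (fun e => ((e.1 : Int), (e.2 : Int)))

theorem pvStep_spec (arr₀ arrC : List (List Int)) (V₀ : Finset (Fin 5 × Fin 5))
    (s : Fin 5 × Fin 5)
    (hArr : ∀ c, c ∉ V₀ → pvValC arrC c = pvValC arr₀ c)
    (hdisj : ∀ c ∈ pvCompB arr₀ s, c ∉ V₀)
    (c : Fin 5 × Fin 5) (hc : c ∈ pvCompB arr₀ s) (hcV0 : c ∉ V₀)
    (d : Int × Int) (hd : d ∈ pvDirsA)
    (v : List (List Int)) (Vis : Finset (Fin 5 × Fin 5)) (ql : List (Fin 5 × Fin 5))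
    (fset : PySem.Set (Int × Int))
    (hinv : BfsInv arr₀ V₀ s v Vis ql fset) :
    ∃ v' Vis' ql' fset',
      pvStep arrC (c.1 : Int) (c.2 : Int) (v, qmap ql, fset, ((Vis \ V₀).card : Int)) d
        = (v', qmap ql', fset', ((Vis' \ V₀).card : Int)) ∧
      BfsInv arr₀ V₀ s v' Vis' ql' fset' ∧
      Vis ⊆ Vis' ∧
      (∃ t, ql' = ql ++ t ∧ ∀ e ∈ t, e ∉ Vis) ∧
      (∀ e ∈ Vis', e ∉ Vis → e ∈ ql') ∧
      (∀ n : Fin 5 × Fin 5, (n.1 : Int) = (c.1 : Int) + d.1 → (n.2 : Int) = (c.2 : Int) + d.2 →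
        pvAdjB arr₀ c n = true → n ∈ Vis') ∧
      ((pvCompB arr₀ s \ Vis').card + ql'.length ≤ (pvCompB arr₀ s \ Vis).card + ql.length) := by
  obtain ⟨hvrep, hV0, hsVis, hVS, hql, hfset⟩ := hinv
  simp only [pvStep]
  by_cases hb : (0 ≤ (c.1 : Int) + d.1 ∧ (c.1 : Int) + d.1 < 5 ∧ 0 ≤ (c.2 : Int) + d.2 ∧ (c.2 : Int) + d.2 < 5)
  case neg =>
    refine ⟨v, Vis, ql, fset, ?_, ⟨hvrep, hV0, hsVis, hVS, hql, hfset⟩, fun _ h => h,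
      ⟨[], by simp, by simp⟩, fun e he hne => absurd he hne, ?_, by simp⟩
    · rw [if_neg (fun hcond => hb ⟨hcond.1, hcond.2.1, hcond.2.2.1, hcond.2.2.2.1⟩)]
    · intro n h1 h2 _
      exact absurd ⟨by omega, by omega, by omega, by omega⟩ hb
  case pos =>
    set ni := (c.1 : Int) + d.1 with hni
    set nj := (c.2 : Int) + d.2 with hnj
    have hb1 : ni.toNat < 5 := by omega
    have hb2 : nj.toNat < 5 := by omega
    set n : Fin 5 × Fin 5 := (⟨ni.toNat, hb1⟩, ⟨nj.toNat, hb2⟩) with hn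
    have hn1 : (n.1 : Int) = ni := by simp [hn]; omega
    have hn2 : (n.2 : Int) = nj := by simp [hn]; omega
    have hgetv : pvIGet v ni nj = pvValC v n := by simp [pvIGet, pvValC, hn]
    have hgeta : pvIGet arrC ni nj = pvValC arrC n := by simp [pvIGet, pvValC, hn]
    have hcoord : ∀ n' : Fin 5 × Fin 5, (n'.1 : Int) = ni → (n'.2 : Int) = nj → n' = n := by
      intro n' h1 h2
      exact Prod.ext_iff.mpr ⟨Fin.ext (by omega), Fin.ext (by omega)⟩
    by_cases hvn : pvValC v n = 0
    case neg =>
      have hnVis : n ∈ Vis := by rw [VRep_mem hvrep]; exact hvn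
      refine ⟨v, Vis, ql, fset, ?_, ⟨hvrep, hV0, hsVis, hVS, hql, hfset⟩, fun _ h => h,
        ⟨[], by simp, by simp⟩, fun e he hne => absurd he hne, ?_, by simp⟩
      · rw [if_neg (fun hcond => hvn (by rw [← hgetv]; exact hcond.2.2.2.2.1))]
      · intro n' h1 h2 _
        rw [hcoord n' h1 h2]
        exact hnVis
    case pos =>
      have hnVis : n ∉ Vis := by rw [VRep_mem hvrep]; simp [hvn]
      have hnV0 : n ∉ V₀ := fun h => hnVis (hV0 h)
      by_cases heq : pvIGet arrC (c.1 : Int) (c.2 : Int) = pvIGet arrC ni nj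
      case neg =>
        refine ⟨v, Vis, ql, fset, ?_, ⟨hvrep, hV0, hsVis, hVS, hql, hfset⟩, fun _ h => h,
          ⟨[], by simp, by simp⟩, fun e he hne => absurd he hne, ?_, by simp⟩
        · rw [if_neg (fun hcond => heq hcond.2.2.2.2.2)]
        · intro n' h1 h2 hadj
          exfalso
          rw [hcoord n' h1 h2] at hadj
          have hnS : n ∈ pvCompB arr₀ s := pvComp_adj arr₀ hc hadj
          have hval : pvValC arr₀ n = pvValC arr₀ c := ((pvAdjB_iff arr₀ c n).mp hadj).2
          apply heq
          rw [pvIGet_cast, hgeta, hArr c hcV0, hArr n (hdisj n hnS), hval]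
      case pos =>
        -- the neighbour is newly visited and enqueued
        have hval0 : pvValC arr₀ n = pvValC arr₀ c := by
          rw [← hArr n hnV0, ← hArr c hcV0, ← hgeta, ← heq, pvIGet_cast]
        have hadj : pvAdjB arr₀ c n = true := by
          rw [pvAdjB_iff]
          refine ⟨?_, hval0⟩
          have e1 : (n.1 : Int) - (c.1 : Int) = d.1 := by omega
          have e2 : (n.2 : Int) - (c.2 : Int) = d.2 := by omega
          rw [e1, e2]
          exact hd
        have hnS : n ∈ pvCompB arr₀ s := pvComp_adj arr₀ hc hadj
        have hsetv : pvISet v ni nj 1 = pvISet v (n.1 : Int) (n.2 : Int) 1 := by rw [hn1, hn2]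
        have hg5 := hvrep.1
        have hbl1 : (n.1 : Nat) < v.length := by rw [hg5.1]; exact n.1.isLt
        have hbl2 : (n.2 : Nat) < (v.getD n.1 []).length := by
          rw [Grid5_shape v hg5 n.1 n.1.isLt]; exact n.2.isLt
        refine ⟨pvISet v ni nj 1, insert n Vis, ql ++ [n], PySem.Set.add fset (ni, nj), ?_, ?_, ?_, ?_, ?_, ?_, ?_⟩
        · rw [if_pos ⟨by omega, by omega, by omega, by omega, by rw [hgetv]; exact hvn, heq⟩]
          have hq : qmap (ql ++ [n]) = qmap ql ++ [(ni, nj)] := by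
            simp [qmap, hn1, hn2]
          have hins : (insert n Vis) \ V₀ = insert n (Vis \ V₀) := by
            ext x
            simp only [Finset.mem_sdiff, Finset.mem_insert]
            constructor
            · rintro ⟨h1 | h1, h2⟩
              · exact Or.inl h1
              · exact Or.inr ⟨h1, h2⟩
            · rintro (h1 | ⟨h1, h2⟩)
              · subst h1; exact ⟨Or.inl rfl, hnV0⟩
              · exact ⟨Or.inr h1, h2⟩
          have hcard : ((insert n Vis) \ V₀).card = (Vis \ V₀).card + 1 := by
            rw [hins, Finset.card_insert_of_notMem (fun h => hnVis (Finset.mem_sdiff.mp h).1)]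
          rw [hq, hcard]
          push_cast
          ring_nf
        · refine ⟨⟨?_, ?_⟩, fun x hx => Finset.mem_insert_of_mem (hV0 hx),
            Finset.mem_insert_of_mem hsVis, ?_, ?_, ?_⟩
          · rw [hsetv]; exact Grid5_pvISet v hg5 n 1
          · intro e
            rw [hsetv, pvValC_pvISet v n e 1 hbl1 hbl2]
            by_cases he : e = n
            · simp [he]
            · rw [if_neg he, hvrep.2 e]
              by_cases hev : e ∈ Vis <;> simp [Finset.mem_insert, he, hev]
          · intro e he heV0
            rcases Finset.mem_insert.mp he with he | he
            · subst he; exact hnS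
            · exact hVS e he heV0
          · intro e he
            rcases List.mem_append.mp he with he | he
            · obtain ⟨h1, h2⟩ := hql e he
              exact ⟨Finset.mem_insert_of_mem h1, h2⟩
            · rw [List.mem_singleton.mp he]
              exact ⟨Finset.mem_insert_self n Vis, hnV0⟩
          · intro p hp
            rcases (PySem.Set.mem_add fset (ni, nj) p).mp hp with hp | hp
            · obtain ⟨e, ⟨h1, h2⟩, h3⟩ := hfset p hp
              exact ⟨e, ⟨Finset.mem_insert_of_mem h1, h2⟩, h3⟩
            · exact ⟨n, ⟨Finset.mem_insert_self n Vis, hnV0⟩, by rw [hp, hn1, hn2]⟩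
        · exact fun x hx => Finset.mem_insert_of_mem hx
        · exact ⟨[n], rfl, fun e he => by rw [List.mem_singleton.mp he]; exact hnVis⟩
        · intro e he hne
          rcases Finset.mem_insert.mp he with he | he
          · exact List.mem_append.mpr (Or.inr (by rw [he]; exact List.mem_singleton.mpr rfl))
          · exact absurd he hne
        · intro n' h1 h2 _
          rw [hcoord n' h1 h2]
          exact Finset.mem_insert_self n Vis
        · have hmem : n ∈ pvCompB arr₀ s \ Vis := Finset.mem_sdiff.mpr ⟨hnS, hnVis⟩
          have hdf : pvCompB arr₀ s \ (insert n Vis) = (pvCompB arr₀ s \ Vis).erase n := by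
            ext x
            simp only [Finset.mem_sdiff, Finset.mem_insert, Finset.mem_erase]
            constructor
            · rintro ⟨h1, h2⟩
              exact ⟨fun hx => h2 (Or.inl hx), h1, fun hx => h2 (Or.inr hx)⟩
            · rintro ⟨h1, h2, h3⟩
              exact ⟨h2, fun hx => hx.elim h1 h3⟩
          rw [hdf, Finset.card_erase_of_mem hmem]
          have : 1 ≤ (pvCompB arr₀ s \ Vis).card := Finset.card_pos.mpr ⟨n, hmem⟩
          simp only [List.length_append, List.length_singleton]
          omega

theorem pvFold_spec (arr₀ arrC : List (List Int)) (V₀ : Finset (Fin 5 × Fin 5))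
    (s : Fin 5 × Fin 5)
    (hArr : ∀ c, c ∉ V₀ → pvValC arrC c = pvValC arr₀ c)
    (hdisj : ∀ c ∈ pvCompB arr₀ s, c ∉ V₀)
    (c : Fin 5 × Fin 5) (hc : c ∈ pvCompB arr₀ s) (hcV0 : c ∉ V₀)
    (ds : List (Int × Int)) (hds : ∀ d ∈ ds, d ∈ pvDirsA) :
    ∀ (v : List (List Int)) (Vis : Finset (Fin 5 × Fin 5)) (ql : List (Fin 5 × Fin 5))
      (fset : PySem.Set (Int × Int)),
      BfsInv arr₀ V₀ s v Vis ql fset →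
      ∃ v' Vis' ql' fset',
        ds.foldl (pvStep arrC (c.1 : Int) (c.2 : Int)) (v, qmap ql, fset, ((Vis \ V₀).card : Int))
          = (v', qmap ql', fset', ((Vis' \ V₀).card : Int)) ∧
        BfsInv arr₀ V₀ s v' Vis' ql' fset' ∧
        Vis ⊆ Vis' ∧
        (∃ t, ql' = ql ++ t ∧ ∀ e ∈ t, e ∉ Vis) ∧
        (∀ e ∈ Vis', e ∉ Vis → e ∈ ql') ∧
        (∀ d ∈ ds, ∀ n : Fin 5 × Fin 5, (n.1 : Int) = (c.1 : Int) + d.1 →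
          (n.2 : Int) = (c.2 : Int) + d.2 → pvAdjB arr₀ c n = true → n ∈ Vis') ∧
        ((pvCompB arr₀ s \ Vis').card + ql'.length ≤ (pvCompB arr₀ s \ Vis).card + ql.length) := by
  induction ds with
  | nil =>
    intro v Vis ql fset hinv
    exact ⟨v, Vis, ql, fset, rfl, hinv, fun _ h => h, ⟨[], by simp, by simp⟩,
      fun e he hne => absurd he hne, by simp, by simp⟩
  | cons d ds ih =>
    intro v Vis ql fset hinv
    obtain ⟨v1, Vis1, ql1, fset1, heq1, hinv1, hsub1, ⟨t1, ht1, ht1n⟩, hnew1, hdir1, hm1⟩ :=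
      pvStep_spec arr₀ arrC V₀ s hArr hdisj c hc hcV0 d (hds d (List.mem_cons_self))
        v Vis ql fset hinv
    obtain ⟨v2, Vis2, ql2, fset2, heq2, hinv2, hsub2, ⟨t2, ht2, ht2n⟩, hnew2, hdir2, hm2⟩ :=
      ih (fun d' hd' => hds d' (List.mem_cons_of_mem d hd')) v1 Vis1 ql1 fset1 hinv1
    refine ⟨v2, Vis2, ql2, fset2, ?_, hinv2, hsub1.trans hsub2, ?_, ?_, ?_, by omega⟩
    · rw [List.foldl_cons, heq1, heq2]
    · refine ⟨t1 ++ t2, by rw [ht2, ht1, List.append_assoc], ?_⟩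
      intro e he
      rcases List.mem_append.mp he with he | he
      · exact ht1n e he
      · intro hev
        exact ht2n e he (hsub1 hev)
    · intro e he hne
      by_cases he1 : e ∈ Vis1
      · have := hnew1 e he1 hne
        rw [ht2]
        exact List.mem_append.mpr (Or.inl this)
      · exact hnew2 e he he1
    · intro d' hd' n h1 h2 hadj
      rcases List.mem_cons.mp hd' with hd' | hd'
      · subst hd'
        exact hsub2 (hdir1 n h1 h2 hadj)
      · exact hdir2 d' hd' n h1 h2 hadj

theorem bfs_exit (arr₀ : List (List Int)) (V₀ : Finset (Fin 5 × Fin 5)) (s : Fin 5 × Fin 5)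
    (hdisj : ∀ c ∈ pvCompB arr₀ s, c ∉ V₀)
    (v : List (List Int)) (Vis : Finset (Fin 5 × Fin 5)) (fset : PySem.Set (Int × Int))
    (hinv : BfsInv arr₀ V₀ s v Vis [] fset)
    (hSsub : pvCompB arr₀ s ⊆ Vis) :
    Vis = V₀ ∪ pvCompB arr₀ s ∧ Vis \ V₀ = pvCompB arr₀ s := by
  obtain ⟨hvrep, hV0, hsVis, hVS, hql, hfset⟩ := hinv
  have hVd : Vis \ V₀ = pvCompB arr₀ s := by
    apply Finset.Subset.antisymm
    · intro x hx
      obtain ⟨h1, h2⟩ := Finset.mem_sdiff.mp hx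
      exact hVS x h1 h2
    · intro x hx
      exact Finset.mem_sdiff.mpr ⟨hSsub hx, hdisj x hx⟩
  refine ⟨?_, hVd⟩
  ext x
  simp only [Finset.mem_union]
  constructor
  · intro hx
    by_cases hxV : x ∈ V₀
    · exact Or.inl hxV
    · exact Or.inr (hVS x hx hxV)
  · rintro (hx | hx)
    · exact hV0 hx
    · exact hSsub hx

theorem pvBfsGo_spec (arr₀ arrC : List (List Int)) (V₀ : Finset (Fin 5 × Fin 5))
    (s : Fin 5 × Fin 5)
    (hArr : ∀ c, c ∉ V₀ → pvValC arrC c = pvValC arr₀ c)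
    (hdisj : ∀ c ∈ pvCompB arr₀ s, c ∉ V₀) :
    ∀ (fuel : Nat) (v : List (List Int)) (Vis : Finset (Fin 5 × Fin 5))
      (ql : List (Fin 5 × Fin 5)) (fset : PySem.Set (Int × Int)),
      BfsInv arr₀ V₀ s v Vis ql fset →
      (∀ c ∈ Vis, c ∉ V₀ → c ∉ ql → ∀ n, pvAdjB arr₀ c n = true → n ∈ Vis) →
      (pvCompB arr₀ s \ Vis).card + ql.length ≤ fuel →
      ∃ v' fset',
        pvBfsGo fuel arrC v (qmap ql) fset ((Vis \ V₀).card : Int)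
          = (v', fset', ((pvCompB arr₀ s).card : Int)) ∧
        VRep v' (V₀ ∪ pvCompB arr₀ s) ∧
        (∀ p ∈ fset', ∃ c : Fin 5 × Fin 5, c ∈ pvCompB arr₀ s ∧ p = ((c.1 : Int), (c.2 : Int))) := by
  intro fuel
  induction fuel with
  | zero =>
    intro v Vis ql fset hinv hproc hfuel
    have hql : ql = [] := by
      cases ql with
      | nil => rfl
      | cons a l => simp at hfuel
    subst hql
    have hSsub : pvCompB arr₀ s ⊆ Vis := by
      have : (pvCompB arr₀ s \ Vis).card = 0 := by omega
      intro x hx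
      by_contra hxv
      have : x ∈ pvCompB arr₀ s \ Vis := Finset.mem_sdiff.mpr ⟨hx, hxv⟩
      have := Finset.card_pos.mpr ⟨x, this⟩
      omega
    obtain ⟨hVis, hVd⟩ := bfs_exit arr₀ V₀ s hdisj v Vis fset hinv hSsub
    refine ⟨v, fset, ?_, ?_, ?_⟩
    · rw [hVd]
      rfl
    · rw [← hVis]
      exact hinv.1
    · intro p hp
      obtain ⟨c, ⟨h1, h2⟩, h3⟩ := hinv.2.2.2.2.2 p hp
      exact ⟨c, by rw [← hVd]; exact Finset.mem_sdiff.mpr ⟨h1, h2⟩, h3⟩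
  | succ fuel ih =>
    intro v Vis ql fset hinv hproc hfuel
    cases ql with
    | nil =>
      have hSsub : pvCompB arr₀ s ⊆ Vis := by
        have hs0 : s ∈ Vis \ V₀ :=
          Finset.mem_sdiff.mpr ⟨hinv.2.2.1, hdisj s (pvComp_self arr₀ s)⟩
        have := pvComp_min arr₀ (T := Vis \ V₀) hs0 (fun c hcT n hn => by
          obtain ⟨h1, h2⟩ := Finset.mem_sdiff.mp hcT
          have hcS := hinv.2.2.2.1 c h1 h2
          have hnS := pvComp_adj arr₀ hcS hn
          exact Finset.mem_sdiff.mpr ⟨hproc c h1 h2 (List.not_mem_nil) n hn, hdisj n hnS⟩)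
        exact this.trans (Finset.sdiff_subset)
      obtain ⟨hVis, hVd⟩ := bfs_exit arr₀ V₀ s hdisj v Vis fset hinv hSsub
      refine ⟨v, fset, ?_, ?_, ?_⟩
      · rw [hVd]
        rfl
      · rw [← hVis]
        exact hinv.1
      · intro p hp
        obtain ⟨c, ⟨h1, h2⟩, h3⟩ := hinv.2.2.2.2.2 p hp
        exact ⟨c, by rw [← hVd]; exact Finset.mem_sdiff.mpr ⟨h1, h2⟩, h3⟩
    | cons c ql' =>
      have hcVis : c ∈ Vis := (hinv.2.2.2.2.1 c List.mem_cons_self).1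
      have hcV0 : c ∉ V₀ := (hinv.2.2.2.2.1 c List.mem_cons_self).2
      have hcS : c ∈ pvCompB arr₀ s := hinv.2.2.2.1 c hcVis hcV0
      have hinv' : BfsInv arr₀ V₀ s v Vis ql' fset := by
        obtain ⟨a, b, c', d, e, f⟩ := hinv
        exact ⟨a, b, c', d, fun x hx => e x (List.mem_cons_of_mem c hx), f⟩
      obtain ⟨v1, Vis1, ql1, fset1, heq1, hinv1, hsub1, ⟨t1, ht1, ht1n⟩, hnew1, hdir1, hm1⟩ :=
        pvFold_spec arr₀ arrC V₀ s hArr hdisj c hcS hcV0 pvDirsA (fun _ h => h)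
          v Vis ql' fset hinv'
      have hproc1 : ∀ e ∈ Vis1, e ∉ V₀ → e ∉ ql1 → ∀ n, pvAdjB arr₀ e n = true → n ∈ Vis1 := by
        intro e he heV0 heql n hadjn
        by_cases heV : e ∈ Vis
        · by_cases hec : e = c
          · subst hec
            obtain ⟨hdd, hvv⟩ := (pvAdjB_iff arr₀ e n).mp hadjn
            refine hdir1 ((n.1 : Int) - (e.1 : Int), (n.2 : Int) - (e.2 : Int)) hdd n ?_ ?_ hadjn
            · show (n.1 : Int) = (e.1 : Int) + ((n.1 : Int) - (e.1 : Int))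
              omega
            · show (n.2 : Int) = (e.2 : Int) + ((n.2 : Int) - (e.2 : Int))
              omega
          · have : e ∉ ql' := by
              intro hx
              apply heql
              rw [ht1]
              exact List.mem_append.mpr (Or.inl hx)
            have : e ∉ (c :: ql') := by
              intro hx
              rcases List.mem_cons.mp hx with hx | hx
              · exact hec hx
              · exact this hx
            exact hsub1 (hproc e heV heV0 this n hadjn)
        · exact absurd (hnew1 e he heV) heql
      have hm' : (pvCompB arr₀ s \ Vis1).card + ql1.length ≤ fuel := by
        simp only [List.length_cons] at hfuel
        omega
      obtain ⟨v2, fset2, heq2, hv2, hf2⟩ := ih v1 Vis1 ql1 fset1 hinv1 hproc1 hm'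
      refine ⟨v2, fset2, ?_, hv2, hf2⟩
      have hq : qmap (c :: ql') = ((c.1 : Int), (c.2 : Int)) :: qmap ql' := by simp [qmap]
      rw [hq]
      show pvBfsGo (fuel + 1) arrC v (((c.1 : Int), (c.2 : Int)) :: qmap ql') fset ((Vis \ V₀).card : Int) = _
      simp only [pvBfsGo]
      rw [heq1]
      exact heq2

-- ---------- the bfs wrapper ----------
def PreRows (arr₀ : List (List Int)) : Prop :=
  5 ≤ arr₀.length ∧ ∀ k < 5, 5 ≤ (arr₀.getD k []).length

theorem clear_fold (arr₀ : List (List Int)) (hP : PreRows arr₀) (W : Finset (Fin 5 × Fin 5)) :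
    ∀ (l : List (Int × Int)) (a : List (List Int)), ShapeEq a arr₀ →
      (∀ p ∈ l, ∃ c : Fin 5 × Fin 5, c ∈ W ∧ p = ((c.1 : Int), (c.2 : Int))) →
      ShapeEq (l.foldl (fun a p => pvISet a p.1 p.2 0) a) arr₀ ∧
      (∀ x : Fin 5 × Fin 5, x ∉ W →
        pvValC (l.foldl (fun a p => pvISet a p.1 p.2 0) a) x = pvValC a x) := by
  intro l
  induction l with
  | nil => exact fun a hs _ => ⟨hs, fun _ _ => rfl⟩
  | cons p l ih =>
    intro a hs hl
    obtain ⟨c, hcW, hpc⟩ := hl p List.mem_cons_self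
    have hb1 : (c.1 : Nat) < a.length := by
      rw [hs.1]; exact lt_of_lt_of_le c.1.isLt hP.1
    have hb2 : (c.2 : Nat) < (a.getD c.1 []).length := by
      rw [hs.2 c.1]; exact lt_of_lt_of_le c.2.isLt (hP.2 c.1 c.1.isLt)
    have hstep : pvISet a p.1 p.2 0 = pvISet a (c.1 : Int) (c.2 : Int) 0 := by rw [hpc]
    have hs' : ShapeEq (pvISet a p.1 p.2 0) arr₀ := by
      rw [hstep]; exact ShapeEq_pvISet a arr₀ hs c 0 hb1
    obtain ⟨h1, h2⟩ := ih (pvISet a p.1 p.2 0) hs' (fun q hq => hl q (List.mem_cons_of_mem p hq))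
    refine ⟨h1, fun x hx => ?_⟩
    rw [List.foldl_cons, h2 x hx, hstep, pvValC_pvISet a c x 0 hb1 hb2,
      if_neg (fun (h : x = c) => hx (by rw [h]; exact hcW))]

theorem pvBfs_spec (arr₀ arrC v : List (List Int)) (Vis : Finset (Fin 5 × Fin 5))
    (s : Fin 5 × Fin 5) (clr : Int)
    (hP : PreRows arr₀)
    (hShape : ShapeEq arrC arr₀)
    (hArr : ∀ c, c ∉ Vis → pvValC arrC c = pvValC arr₀ c)
    (hvrep : VRep v Vis)
    (hclosed : ∀ c ∈ Vis, pvCompB arr₀ c ⊆ Vis)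
    (hs : s ∉ Vis) :
    ∃ arr' v',
      pvBfs arrC v (s.1 : Int) (s.2 : Int) clr
        = (arr', v', (if 3 ≤ (pvCompB arr₀ s).card then ((pvCompB arr₀ s).card : Int) else 0)) ∧
      ShapeEq arr' arr₀ ∧
      (∀ c : Fin 5 × Fin 5, c ∉ Vis ∪ pvCompB arr₀ s → pvValC arr' c = pvValC arr₀ c) ∧
      VRep v' (Vis ∪ pvCompB arr₀ s) := by
  have hdisj : ∀ c ∈ pvCompB arr₀ s, c ∉ Vis := by
    intro c hc hcV
    exact hs (hclosed c hcV (pvComp_mem_symm arr₀ hc))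
  have hg5 := hvrep.1
  have hb1 : (s.1 : Nat) < v.length := by rw [hg5.1]; exact s.1.isLt
  have hb2 : (s.2 : Nat) < (v.getD s.1 []).length := by
    rw [Grid5_shape v hg5 s.1 s.1.isLt]; exact s.2.isLt
  have hvrep1 : VRep (pvISet v (s.1 : Int) (s.2 : Int) 1) (insert s Vis) := by
    refine ⟨Grid5_pvISet v hg5 s 1, fun e => ?_⟩
    rw [pvValC_pvISet v s e 1 hb1 hb2]
    by_cases he : e = s
    · simp [he]
    · rw [if_neg he, hvrep.2 e]
      by_cases hev : e ∈ Vis <;> simp [Finset.mem_insert, he, hev]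
  have hinv : BfsInv arr₀ Vis s (pvISet v (s.1 : Int) (s.2 : Int) 1) (insert s Vis) [s]
      (PySem.Set.add PySem.Set.empty ((s.1 : Int), (s.2 : Int))) := by
    refine ⟨hvrep1, fun x hx => Finset.mem_insert_of_mem hx, Finset.mem_insert_self s Vis,
      ?_, ?_, ?_⟩
    · intro c hc hcV
      rcases Finset.mem_insert.mp hc with hc | hc
      · subst hc; exact pvComp_self arr₀ c
      · exact absurd hc hcV
    · intro c hc
      rw [List.mem_singleton.mp hc]
      exact ⟨Finset.mem_insert_self s Vis, hs⟩
    · intro p hp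
      rcases (PySem.Set.mem_add PySem.Set.empty ((s.1 : Int), (s.2 : Int)) p).mp hp with h | h
      · exact absurd h List.not_mem_nil
      · exact ⟨s, ⟨Finset.mem_insert_self s Vis, hs⟩, h⟩
  have hproc : ∀ c ∈ (insert s Vis), c ∉ Vis → c ∉ ([s] : List (Fin 5 × Fin 5)) →
      ∀ n, pvAdjB arr₀ c n = true → n ∈ insert s Vis := by
    intro c hc hcV hcq n _
    rcases Finset.mem_insert.mp hc with hc | hc
    · exact absurd (hc ▸ List.mem_singleton.mpr rfl) hcq
    · exact absurd hc hcV
  have hfuel : (pvCompB arr₀ s \ insert s Vis).card + ([s] : List (Fin 5 × Fin 5)).length ≤ 25 := by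
    have hsub : pvCompB arr₀ s \ insert s Vis ⊆ Finset.univ.erase s := by
      intro x hx
      obtain ⟨h1, h2⟩ := Finset.mem_sdiff.mp hx
      exact Finset.mem_erase.mpr ⟨fun h => h2 (h ▸ Finset.mem_insert_self s Vis),
        Finset.mem_univ x⟩
    have := Finset.card_le_card hsub
    have h25 : (Finset.univ.erase s).card = 24 := by
      rw [Finset.card_erase_of_mem (Finset.mem_univ s)]
      simp
    simp only [List.length_singleton]
    omega
  obtain ⟨v', fset', heq, hv', hf'⟩ :=
    pvBfsGo_spec arr₀ arrC Vis s hArr hdisj 25 (pvISet v (s.1 : Int) (s.2 : Int) 1)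
      (insert s Vis) [s] (PySem.Set.add PySem.Set.empty ((s.1 : Int), (s.2 : Int))) hinv hproc hfuel
  have hcnt1 : ((insert s Vis \ Vis).card : Int) = 0 + 1 := by
    have : insert s Vis \ Vis = {s} := by
      ext x
      simp only [Finset.mem_sdiff, Finset.mem_insert, Finset.mem_singleton]
      constructor
      · rintro ⟨h1 | h1, h2⟩
        · exact h1
        · exact absurd h1 h2
      · rintro rfl
        exact ⟨Or.inl rfl, hs⟩
    rw [this]
    simp
  have hq1 : qmap [s] = [] ++ [((s.1 : Int), (s.2 : Int))] := by simp [qmap]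
  simp only [pvBfs]
  rw [← hq1, ← hcnt1, heq]
  by_cases hbig : (3 : Int) ≤ ((pvCompB arr₀ s).card : Int)
  · have hbign : 3 ≤ (pvCompB arr₀ s).card := by exact_mod_cast hbig
    by_cases hclr : clr = 1
    · obtain ⟨hsh, hcl⟩ := clear_fold arr₀ hP (pvCompB arr₀ s) fset' arrC hShape
        (fun p hp => hf' p hp)
      rw [if_pos hbig, if_pos hclr, if_pos hbign]
      refine ⟨_, v', rfl, hsh, ?_, hv'⟩
      intro c hc
      rw [hcl c (fun h => hc (Finset.mem_union_right Vis h)),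
        hArr c (fun h => hc (Finset.mem_union_left _ h))]
    · rw [if_pos hbig, if_neg hclr, if_pos hbign]
      refine ⟨arrC, v', rfl, hShape, ?_, hv'⟩
      intro c hc
      exact hArr c (fun h => hc (Finset.mem_union_left _ h))
  · have hbign : ¬ 3 ≤ (pvCompB arr₀ s).card := by exact_mod_cast hbig
    rw [if_neg hbig, if_neg hbign]
    refine ⟨arrC, v', rfl, hShape, ?_, hv'⟩
    intro c hc
    exact hArr c (fun h => hc (Finset.mem_union_left _ h))

-- ---------- the outer scan ----------
def pvBody (clr : Int) (st : List (List Int) × List (List Int) × Int) (c : Fin 5 × Fin 5) :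
    List (List Int) × List (List Int) × Int :=
  if pvIGet st.2.1 (c.1 : Int) (c.2 : Int) = 0 then
    let r := pvBfs st.1 st.2.1 (c.1 : Int) (c.2 : Int) clr
    (r.1, r.2.1, st.2.2 + r.2.2)
  else st

def OuterInv (arr₀ : List (List Int)) (st : List (List Int) × List (List Int) × Int)
    (Vis : Finset (Fin 5 × Fin 5)) : Prop :=
  ShapeEq st.1 arr₀ ∧ (∀ c : Fin 5 × Fin 5, c ∉ Vis → pvValC st.1 c = pvValC arr₀ c) ∧
  VRep st.2.1 Vis ∧
  (∀ c ∈ Vis, pvCompB arr₀ c ⊆ Vis) ∧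
  st.2.2 = ((Vis.filter (fun c => 3 ≤ (pvCompB arr₀ c).card)).card : Int)

theorem pvBody_spec (arr₀ : List (List Int)) (hP : PreRows arr₀) (clr : Int)
    (st : List (List Int) × List (List Int) × Int) (Vis : Finset (Fin 5 × Fin 5))
    (hinv : OuterInv arr₀ st Vis) (c : Fin 5 × Fin 5) :
    OuterInv arr₀ (pvBody clr st c) (Vis ∪ pvCompB arr₀ c) := by
  obtain ⟨hsh, harr, hvrep, hclosed, hcnt⟩ := hinv
  by_cases hc : c ∈ Vis
  · have hval : pvValC st.2.1 c ≠ 0 := (VRep_mem hvrep c).mp hc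
    have hun : Vis ∪ pvCompB arr₀ c = Vis :=
      Finset.union_eq_left.mpr (hclosed c hc)
    rw [hun]
    unfold pvBody
    rw [pvIGet_cast, if_neg hval]
    exact ⟨hsh, harr, hvrep, hclosed, hcnt⟩
  · have hval : pvValC st.2.1 c = 0 := by
      by_contra h
      exact hc ((VRep_mem hvrep c).mpr h)
    obtain ⟨arr', v', heq, hsh', harr', hvrep'⟩ :=
      pvBfs_spec arr₀ st.1 st.2.1 Vis c clr hP hsh harr hvrep hclosed hc
    unfold pvBody
    rw [pvIGet_cast, if_pos hval, heq]
    have hdisj : ∀ x ∈ pvCompB arr₀ c, x ∉ Vis := by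
      intro x hx hxV
      exact hc (hclosed x hxV (pvComp_mem_symm arr₀ hx))
    refine ⟨hsh', harr', hvrep', ?_, ?_⟩
    · intro x hx
      rcases Finset.mem_union.mp hx with hx | hx
      · exact (hclosed x hx).trans Finset.subset_union_left
      · rw [pvComp_eq_of_mem arr₀ hx]
        exact Finset.subset_union_right
    · have hfu : (Vis ∪ pvCompB arr₀ c).filter (fun x => 3 ≤ (pvCompB arr₀ x).card)
          = Vis.filter (fun x => 3 ≤ (pvCompB arr₀ x).card)
            ∪ (pvCompB arr₀ c).filter (fun x => 3 ≤ (pvCompB arr₀ x).card) :=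
        Finset.filter_union _ _ _
      have hdisj2 : Disjoint (Vis.filter (fun x => 3 ≤ (pvCompB arr₀ x).card))
          ((pvCompB arr₀ c).filter (fun x => 3 ≤ (pvCompB arr₀ x).card)) := by
        apply Finset.disjoint_filter_filter
        rw [Finset.disjoint_left]
        exact fun a ha ha' => hdisj a ha' ha
      have hcard := Finset.card_union_of_disjoint hdisj2
      simp only [hcnt]
      rw [hfu, hcard]
      by_cases hbig : 3 ≤ (pvCompB arr₀ c).card
      · have : (pvCompB arr₀ c).filter (fun x => 3 ≤ (pvCompB arr₀ x).card) = pvCompB arr₀ c := by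
          apply Finset.filter_true_of_mem
          intro x hx
          rw [pvComp_eq_of_mem arr₀ hx]
          exact hbig
        rw [this, if_pos hbig]
        push_cast
        ring
      · have : (pvCompB arr₀ c).filter (fun x => 3 ≤ (pvCompB arr₀ x).card) = ∅ := by
          apply Finset.filter_false_of_mem
          intro x hx
          rw [pvComp_eq_of_mem arr₀ hx]
          exact hbig
        rw [this, if_neg hbig]
        push_cast
        simp

theorem scan_spec (arr₀ : List (List Int)) (hP : PreRows arr₀) (clr : Int) :
    ∀ (L : List (Fin 5 × Fin 5)) (st : List (List Int) × List (List Int) × Int)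
      (Vis : Finset (Fin 5 × Fin 5)), OuterInv arr₀ st Vis →
      ∃ Vis', OuterInv arr₀ (L.foldl (pvBody clr) st) Vis' ∧ Vis ⊆ Vis' ∧ ∀ c ∈ L, c ∈ Vis' := by
  intro L
  induction L with
  | nil => exact fun st Vis h => ⟨Vis, h, fun _ h => h, by simp⟩
  | cons c L ih =>
    intro st Vis hinv
    have h1 := pvBody_spec arr₀ hP clr st Vis hinv c
    obtain ⟨Vis', hinv', hsub', hmem'⟩ := ih (pvBody clr st c) (Vis ∪ pvCompB arr₀ c) h1
    refine ⟨Vis', hinv', Finset.subset_union_left.trans hsub', ?_⟩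
    intro x hx
    rcases List.mem_cons.mp hx with hx | hx
    · subst hx
      exact hsub' (Finset.mem_union_right Vis (pvComp_self arr₀ x))
    · exact hmem' x hx

-- ---------- bridges: port A ----------
def cellScan : List (Fin 5 × Fin 5) :=
  (List.finRange 5).flatMap (fun i => (List.finRange 5).map (fun j => (i, j)))

theorem find_you_eq_scan (arr : List (List Int)) (clr : Int) :
    find_you arr clr = (cellScan.foldl (pvBody clr) (arr, pvZeros5, (0 : Int))).2.2 := by
  unfold find_you
  simp only [bind_pure_comp, List.map_eq_map, ← List.map_coe_finRange_eq_range, List.map_map,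
    List.foldl_map, cellScan, List.foldl_flatMap, pvBody]
  congr 1

theorem scan_complete : ∀ c : Fin 5 × Fin 5, c ∈ cellScan := by decide

theorem scan_nodup : cellScan.Nodup := by decide

theorem card_filter_eq_scan (p : Fin 5 × Fin 5 → Prop) [DecidablePred p] :
    (Finset.univ.filter p).card = (cellScan.filter (fun c => decide (p c))).length := by
  have h1 : cellScan.toFinset = Finset.univ := by
    apply Finset.eq_univ_iff_forall.mpr
    intro x
    rw [List.mem_toFinset]
    exact scan_complete x
  rw [← h1]
  calc (Finset.filter p cellScan.toFinset).card
      = (Finset.filter (fun c => decide (p c) = true) cellScan.toFinset).card := by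
        apply congrArg
        apply Finset.filter_congr
        intro x _
        simp
    _ = ((cellScan.filter (fun c => decide (p c))).toFinset).card := by rw [List.toFinset_filter]
    _ = (cellScan.filter (fun c => decide (p c))).length :=
        List.toFinset_card_of_nodup (scan_nodup.filter _)

theorem pre_rows (arr : List (List Int)) (hPre : Pre_find_you arr 0) : PreRows arr := by
  obtain ⟨h1, h2⟩ := hPre
  refine ⟨h1, fun k hk => ?_⟩
  have hkl : k < arr.length := by omega
  rw [List.getD_eq_getElem _ _ hkl]
  apply h2
  have hk5 : k < (arr.take 5).length := by
    rw [List.length_take]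
    omega
  have := List.getElem_take (xs := arr) (i := k) (h := hk5)
  rw [← this]
  exact List.getElem_mem _

theorem grid5_zeros : Grid5 pvZeros5 := by
  constructor
  · rfl
  · decide

theorem zeros_val : ∀ c : Fin 5 × Fin 5, pvValC pvZeros5 c = 0 := by decide

-- A's return value is the number of cells lying in components of size ≥ 3
theorem A_eq_card (arr : List (List Int)) (clr : Int) (hPre : Pre_find_you arr clr) :
    find_you arr clr
      = (((Finset.univ.filter (fun c : Fin 5 × Fin 5 => 3 ≤ (pvCompB arr c).card)).card : Int)) := by
  have hP : PreRows arr := pre_rows arr ⟨hPre.1, hPre.2⟩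
  have hinv0 : OuterInv arr (arr, pvZeros5, (0 : Int)) ∅ := by
    refine ⟨⟨rfl, fun k => rfl⟩, fun c _ => rfl, ⟨grid5_zeros, fun c => ?_⟩, by simp, by simp⟩
    simp [zeros_val c]
  obtain ⟨Vis', hinv', _, hall⟩ := scan_spec arr hP clr cellScan (arr, pvZeros5, (0 : Int)) ∅ hinv0
  have hVuniv : Vis' = Finset.univ :=
    Finset.eq_univ_iff_forall.mpr (fun c => hall c (scan_complete c))
  rw [find_you_eq_scan, hinv'.2.2.2.2, hVuniv]

-- ---------- bridges: port B (union-find) ----------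
-- cell ↔ index coding
def idxC (c : Fin 5 × Fin 5) : Nat := 5 * (c.1 : Nat) + (c.2 : Nat)
def cellD (k : Nat) : Fin 5 × Fin 5 :=
  (⟨k / 5 % 5, Nat.mod_lt _ (by norm_num)⟩, ⟨k % 5, Nat.mod_lt _ (by norm_num)⟩)

theorem idxC_lt (c : Fin 5 × Fin 5) : idxC c < 25 := by
  have h1 := c.1.isLt; have h2 := c.2.isLt
  unfold idxC; omega

theorem cellD_idxC (c : Fin 5 × Fin 5) : cellD (idxC c) = c := by
  rcases c with ⟨⟨i, hi⟩, ⟨j, hj⟩⟩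
  refine Prod.ext_iff.mpr ⟨Fin.ext ?_, Fin.ext ?_⟩ <;>
    simp only [cellD, idxC, Fin.val_mk] <;> omega

theorem idxC_cellD (k : Nat) (hk : k < 25) : idxC (cellD k) = k := by
  simp only [cellD, idxC, Fin.val_mk]; omega

-- DSU invariant: every parent pointer is a nonnegative index ≤ its own index
def DsuInv (p : List Int) : Prop :=
  p.length = 25 ∧ ∀ k, k < 25 → 0 ≤ p.getD k 0 ∧ (p.getD k 0).toNat ≤ k

-- the root reached by following parent pointers (proof-side model of `find`)
def rootN (p : List Int) (x : Nat) : Nat :=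
  if h : (p.getD x 0).toNat < x then rootN p (p.getD x 0).toNat else x
termination_by x

theorem rootN_le (p : List Int) (x : Nat) : rootN p x ≤ x := by
  induction x using Nat.strong_induction_on with
  | _ x ih =>
    rw [rootN]
    split
    · exact le_of_lt (lt_of_le_of_lt (ih _ (by assumption)) (by assumption))
    · exact le_rfl

theorem rootN_of_fix (p : List Int) (x : Nat) (h : p.getD x 0 = (x : Int)) :
    rootN p x = x := by
  rw [rootN, dif_neg]
  rw [h]
  simp

theorem rootN_fix (p : List Int) (hI : DsuInv p) :
    ∀ x, x < 25 → p.getD (rootN p x) 0 = ((rootN p x : Nat) : Int) := by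
  intro x
  induction x using Nat.strong_induction_on with
  | _ x ih =>
    intro hx
    rw [rootN]
    split
    · exact ih _ (by assumption) (by omega)
    · rename_i h
      obtain ⟨h0, hle⟩ := hI.2 x hx
      have : (p.getD x 0).toNat = x := by omega
      omega

theorem dsuFind_eq (p : List Int) (hI : DsuInv p) :
    ∀ (fuel n : Nat), n < 25 → n < fuel →
      dsuFind p fuel ((n : Nat) : Int) = ((rootN p n : Nat) : Int) := by
  intro fuel
  induction fuel with
  | zero => intro n _ h; omega
  | succ fuel ih =>
    intro n hn25 hnf
    obtain ⟨h0, hle⟩ := hI.2 n hn25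
    show (if p.getD ((n : Int)).toNat 0 = (n : Int) then (n : Int)
          else dsuFind p fuel (p.getD ((n : Int)).toNat 0)) = _
    rw [Int.toNat_natCast]
    by_cases heq : p.getD n 0 = (n : Int)
    · rw [if_pos heq, rootN_of_fix p n heq]
    · rw [if_neg heq]
      have hlt : (p.getD n 0).toNat < n := by omega
      have hcast : p.getD n 0 = (((p.getD n 0).toNat : Nat) : Int) := by omega
      have hr : rootN p n = rootN p (p.getD n 0).toNat := by
        conv_lhs => rw [rootN]
        rw [dif_pos hlt]
      rw [hcast, ih _ (by omega) (by omega), hr]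

theorem DsuInv_set (p : List Int) (hI : DsuInv p) (r v : Nat) (hr : r < 25) (hv : v ≤ r) :
    DsuInv (p.set r ((v : Nat) : Int)) := by
  refine ⟨by rw [List.length_set, hI.1], fun k hk => ?_⟩
  rw [getD_set_lt _ _ _ _ _ (by rw [hI.1]; exact hr)]
  by_cases hkr : k = r
  · rw [if_pos hkr]; subst hkr; simp; omega
  · rw [if_neg hkr]; exact hI.2 k hk

theorem rootN_set (p : List Int) (hI : DsuInv p) (r v : Nat) (hr25 : r < 25)
    (hrr : p.getD r 0 = (r : Int)) (hvr : v < r) (hvv : p.getD v 0 = (v : Int)) :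
    ∀ x, x < 25 → rootN (p.set r ((v : Nat) : Int)) x
      = if rootN p x = r then v else rootN p x := by
  have hlen : r < p.length := by rw [hI.1]; exact hr25
  have hget : ∀ k, (p.set r ((v : Nat) : Int)).getD k 0 = if k = r then (v : Int) else p.getD k 0 :=
    fun k => getD_set_lt _ _ _ _ _ hlen
  have hqv : rootN (p.set r ((v : Nat) : Int)) v = v := by
    apply rootN_of_fix
    rw [hget, if_neg (by omega), hvv]
  intro x
  induction x using Nat.strong_induction_on with
  | _ x ih =>
    intro hx
    by_cases hxr : x = r
    · subst hxr
      rw [rootN, hget]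
      rw [if_pos rfl]
      have : ((v : Int)).toNat < x := by omega
      rw [dif_pos this]
      simp only [Int.toNat_natCast]
      rw [hqv, rootN_of_fix p x hrr, if_pos rfl]
    · rw [rootN, hget, if_neg hxr]
      by_cases hlt : (p.getD x 0).toNat < x
      · rw [dif_pos hlt]
        have h25 : (p.getD x 0).toNat < 25 := by omega
        rw [ih _ hlt h25]
        have : rootN p x = rootN p (p.getD x 0).toNat := by
          conv_lhs => rw [rootN, dif_pos hlt]
        rw [this]
      · rw [dif_neg hlt]
        have hrx : rootN p x = x := by rw [rootN, dif_neg hlt]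
        rw [hrx, if_neg hxr]

-- how a union reshapes the root function
def mergeR (ra rb r : Nat) : Nat := if r = ra ∨ r = rb then min ra rb else r

theorem mergeR_of_mem {ra rb r : Nat} (h : r = ra ∨ r = rb) : mergeR ra rb r = min ra rb := by
  unfold mergeR; rw [if_pos h]

theorem mergeR_of_not {ra rb r : Nat} (h : ¬(r = ra ∨ r = rb)) : mergeR ra rb r = r := by
  unfold mergeR; rw [if_neg h]

theorem dsuUnion_spec (p : List Int) (hI : DsuInv p) (a b : Nat) (ha : a < 25) (hb : b < 25) :
    DsuInv (dsuUnion p ((a : Nat) : Int) ((b : Nat) : Int)) ∧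
    ∀ x, x < 25 → rootN (dsuUnion p ((a : Nat) : Int) ((b : Nat) : Int)) x
      = mergeR (rootN p a) (rootN p b) (rootN p x) := by
  have hfa := dsuFind_eq p hI 25 a ha (by omega)
  have hfb := dsuFind_eq p hI 25 b hb (by omega)
  have hra25 : rootN p a < 25 := lt_of_le_of_lt (rootN_le p a) ha
  have hrb25 : rootN p b < 25 := lt_of_le_of_lt (rootN_le p b) hb
  have hfixa := rootN_fix p hI a ha
  have hfixb := rootN_fix p hI b hb
  unfold dsuUnion
  rw [hfa, hfb]
  by_cases h1 : rootN p a < rootN p b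
  · rw [if_pos (by exact_mod_cast h1)]
    simp only [Int.toNat_natCast]
    constructor
    · exact DsuInv_set p hI _ _ hrb25 (by omega)
    · intro x hx
      rw [rootN_set p hI _ _ hrb25 hfixb h1 hfixa x hx]
      unfold mergeR
      have hmin : min (rootN p a) (rootN p b) = rootN p a := by omega
      by_cases hxb : rootN p x = rootN p b
      · rw [if_pos hxb, if_pos (Or.inr hxb), hmin]
      · rw [if_neg hxb]
        by_cases hxa : rootN p x = rootN p a
        · rw [if_pos (Or.inl hxa), hmin, hxa]
        · rw [if_neg (by tauto)]
  · rw [if_neg (by exact_mod_cast h1)]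
    by_cases h2 : rootN p b < rootN p a
    · rw [if_pos (by exact_mod_cast h2)]
      simp only [Int.toNat_natCast]
      constructor
      · exact DsuInv_set p hI _ _ hra25 (by omega)
      · intro x hx
        rw [rootN_set p hI _ _ hra25 hfixa h2 hfixb x hx]
        unfold mergeR
        have hmin : min (rootN p a) (rootN p b) = rootN p b := by omega
        by_cases hxa : rootN p x = rootN p a
        · rw [if_pos hxa, if_pos (Or.inl hxa), hmin]
        · rw [if_neg hxa]
          by_cases hxb : rootN p x = rootN p b
          · rw [if_pos (Or.inr hxb), hmin, hxb]
          · rw [if_neg (by tauto)]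
    · rw [if_neg (by exact_mod_cast h2)]
      have hab : rootN p a = rootN p b := by omega
      refine ⟨hI, fun x hx => ?_⟩
      unfold mergeR
      by_cases hxa : rootN p x = rootN p a
      · rw [if_pos (Or.inl hxa), ← hab, ← hxa]
        omega
      · rw [if_neg (by rw [← hab]; tauto)]

-- the union pass as a fold over an explicit edge list
def edgeL (arr : List (List Int)) : List (Nat × Nat) :=
  (List.range 5).flatMap (fun i => (List.range 5).flatMap (fun j =>
    (if i < 4 ∧ pvBGet arr i j = pvBGet arr (i + 1) j then [(5 * i + j, 5 * i + j + 5)] else []) ++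
    (if j < 4 ∧ pvBGet arr i j = pvBGet arr i (j + 1) then [(5 * i + j, 5 * i + j + 1)] else [])))

def dsuStep (p : List Int) (e : Nat × Nat) : List Int :=
  dsuUnion p ((e.1 : Nat) : Int) ((e.2 : Nat) : Int)

theorem pass_eq (arr : List (List Int)) (p : List Int) :
    (List.range 5).foldl (fun p (i : Nat) =>
      (List.range 5).foldl (fun p (j : Nat) =>
        let k : Int := 5 * (i : Int) + (j : Int)
        let p1 := if i < 4 ∧ pvBGet arr i j = pvBGet arr (i + 1) j then dsuUnion p k (k + 5) else p
        if j < 4 ∧ pvBGet arr i j = pvBGet arr i (j + 1) then dsuUnion p1 k (k + 1) else p1) p) p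
      = (edgeL arr).foldl dsuStep p := by
  unfold edgeL
  rw [List.foldl_flatMap]
  congr 1
  funext p i
  rw [List.foldl_flatMap]
  congr 1
  funext p j
  rw [List.foldl_append]
  have c1 : ((5 * i + j : Nat) : Int) = 5 * (i : Int) + (j : Int) := by push_cast; ring
  have c2 : ((5 * i + j + 5 : Nat) : Int) = 5 * (i : Int) + (j : Int) + 5 := by push_cast; ring
  have c3 : ((5 * i + j + 1 : Nat) : Int) = 5 * (i : Int) + (j : Int) + 1 := by push_cast; ring
  split_ifs <;> simp [dsuStep, c1, c2, c3]

theorem cellD_pair (i j : Nat) (hi : i < 5) (hj : j < 5) :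
    cellD (5 * i + j) = (⟨i, hi⟩, ⟨j, hj⟩) := by
  refine Prod.ext_iff.mpr ⟨Fin.ext ?_, Fin.ext ?_⟩ <;>
    simp only [cellD, Fin.val_mk] <;> omega

theorem pvValC_BGet (arr : List (List Int)) (i j : Nat) (hi : i < 5) (hj : j < 5) :
    pvValC arr (⟨i, hi⟩, ⟨j, hj⟩) = pvBGet arr i j := rfl

theorem edgeL_bounds (arr : List (List Int)) :
    ∀ e ∈ edgeL arr, e.1 < 25 ∧ e.2 < 25 ∧ pvAdjB arr (cellD e.1) (cellD e.2) = true := by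
  intro e he
  simp only [edgeL, List.mem_flatMap, List.mem_range, List.mem_append] at he
  obtain ⟨i, hi, j, hj, hcase⟩ := he
  have hadj : ∀ (i2 j2 : Nat) (hi2 : i2 < 5) (hj2 : j2 < 5) (hi : i < 5) (hj : j < 5),
      (i2 : Int) - i = 0 ∧ (j2 : Int) - j = 1 ∨ (i2 : Int) - i = 1 ∧ (j2 : Int) - j = 0 →
      pvBGet arr i j = pvBGet arr i2 j2 →
      pvAdjB arr (⟨i, hi⟩, ⟨j, hj⟩) (⟨i2, hi2⟩, ⟨j2, hj2⟩) = true := by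
    intro i2 j2 hi2 hj2 hi' hj' hd hv
    unfold pvAdjB
    rw [pvValC_BGet, pvValC_BGet, ← hv]
    refine (Bool.and_eq_true _ _).mpr ⟨?_, beq_iff_eq.mpr rfl⟩
    exact beq_iff_eq.mpr
      (show ((i2 : Int) - (i : Int)).natAbs + ((j2 : Int) - (j : Int)).natAbs = 1 by omega)
  rcases hcase with hmem | hmem
  · by_cases hP : i < 4 ∧ pvBGet arr i j = pvBGet arr (i + 1) j
    case neg => rw [if_neg hP] at hmem; exact absurd hmem List.not_mem_nil
    rw [if_pos hP] at hmem
    rw [List.mem_singleton.mp hmem]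
    refine ⟨by omega, by omega, ?_⟩
    rw [cellD_pair _ _ hi hj, show 5 * i + j + 5 = 5 * (i + 1) + j by ring,
      cellD_pair _ _ (by omega) hj]
    exact hadj (i + 1) j (by omega) hj hi hj (Or.inr ⟨by push_cast; ring, by push_cast; ring⟩) hP.2
  · by_cases hQ : j < 4 ∧ pvBGet arr i j = pvBGet arr i (j + 1)
    case neg => rw [if_neg hQ] at hmem; exact absurd hmem List.not_mem_nil
    rw [if_pos hQ] at hmem
    rw [List.mem_singleton.mp hmem]
    refine ⟨by omega, by omega, ?_⟩
    rw [cellD_pair _ _ hi hj, show 5 * i + j + 1 = 5 * i + (j + 1) by ring,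
      cellD_pair _ _ hi (show j + 1 < 5 by omega)]
    exact hadj i (j + 1) hi (by omega) hi hj (Or.inl ⟨by push_cast; ring, by push_cast; ring⟩) hQ.2

theorem mem_edgeL_down (arr : List (List Int)) (i j : Nat) (hi : i < 4) (hj : j < 5)
    (hv : pvBGet arr i j = pvBGet arr (i + 1) j) :
    (5 * i + j, 5 * i + j + 5) ∈ edgeL arr := by
  simp only [edgeL, List.mem_flatMap, List.mem_range, List.mem_append]
  exact ⟨i, by omega, j, hj, Or.inl (by rw [if_pos ⟨hi, hv⟩]; exact List.mem_singleton.mpr rfl)⟩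

theorem mem_edgeL_right (arr : List (List Int)) (i j : Nat) (hi : i < 5) (hj : j < 4)
    (hv : pvBGet arr i j = pvBGet arr i (j + 1)) :
    (5 * i + j, 5 * i + j + 1) ∈ edgeL arr := by
  simp only [edgeL, List.mem_flatMap, List.mem_range, List.mem_append]
  exact ⟨i, hi, j, by omega, Or.inr (by rw [if_pos ⟨hj, hv⟩]; exact List.mem_singleton.mpr rfl)⟩

-- invariant: root-equal indices are connected in the grid graph
def ConnOK (arr : List (List Int)) (p : List Int) : Prop :=
  ∀ x y, x < 25 → y < 25 → rootN p x = rootN p y → cellD y ∈ pvCompB arr (cellD x)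

theorem fold_edges (arr : List (List Int)) :
    ∀ (E : List (Nat × Nat)) (p : List Int),
      (∀ e ∈ E, e.1 < 25 ∧ e.2 < 25 ∧ pvAdjB arr (cellD e.1) (cellD e.2) = true) →
      DsuInv p → ConnOK arr p →
      DsuInv (E.foldl dsuStep p) ∧ ConnOK arr (E.foldl dsuStep p) ∧
      (∀ x y, x < 25 → y < 25 → rootN p x = rootN p y →
        rootN (E.foldl dsuStep p) x = rootN (E.foldl dsuStep p) y) ∧
      (∀ e ∈ E, rootN (E.foldl dsuStep p) e.1 = rootN (E.foldl dsuStep p) e.2) := by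
  intro E
  induction E with
  | nil =>
    intro p _ hI hC
    exact ⟨hI, hC, fun x y _ _ h => h, by simp⟩
  | cons e E ih =>
    intro p hE hI hC
    obtain ⟨ha, hb, hadj⟩ := hE e List.mem_cons_self
    obtain ⟨hI1, hroot1⟩ := dsuUnion_spec p hI e.1 e.2 ha hb
    have hstep : dsuStep p e = dsuUnion p ((e.1 : Nat) : Int) ((e.2 : Nat) : Int) := rfl
    have hroot : ∀ x, x < 25 → rootN (dsuStep p e) x
        = mergeR (rootN p e.1) (rootN p e.2) (rootN p x) := by
      rw [hstep]; exact hroot1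
    have hIp1 : DsuInv (dsuStep p e) := by rw [hstep]; exact hI1
    have hC1 : ConnOK arr (dsuStep p e) := by
      intro x y hx hy hxy
      rw [hroot x hx, hroot y hy] at hxy
      have hconnAB : cellD e.2 ∈ pvCompB arr (cellD e.1) :=
        pvComp_adj arr (pvComp_self arr (cellD e.1)) hadj
      by_cases hxm : rootN p x = rootN p e.1 ∨ rootN p x = rootN p e.2
      · by_cases hym : rootN p y = rootN p e.1 ∨ rootN p y = rootN p e.2
        · -- both classes merged: chain through the edge (e.1, e.2)
          have hxe : cellD x ∈ pvCompB arr (cellD e.1) := by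
            rcases hxm with h | h
            · exact pvComp_mem_symm arr (hC x e.1 hx ha h)
            · have := pvComp_mem_symm arr (hC x e.2 hx hb h)
              exact (pvComp_eq_of_mem arr hconnAB) ▸ this
          have hye : cellD y ∈ pvCompB arr (cellD e.1) := by
            rcases hym with h | h
            · exact pvComp_mem_symm arr (hC y e.1 hy ha h)
            · have := pvComp_mem_symm arr (hC y e.2 hy hb h)
              exact (pvComp_eq_of_mem arr hconnAB) ▸ this
          rw [← pvComp_eq_of_mem arr (pvComp_mem_symm arr hxe)]
          exact pvComp_mem_symm arr (pvComp_mem_symm arr hye)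
        · rw [mergeR_of_mem hxm, mergeR_of_not hym] at hxy
          exfalso
          rcases min_choice (rootN p e.1) (rootN p e.2) with hmin | hmin
          · rw [hmin] at hxy; exact hym (Or.inl hxy.symm)
          · rw [hmin] at hxy; exact hym (Or.inr hxy.symm)
      · by_cases hym : rootN p y = rootN p e.1 ∨ rootN p y = rootN p e.2
        · rw [mergeR_of_not hxm, mergeR_of_mem hym] at hxy
          exfalso
          rcases min_choice (rootN p e.1) (rootN p e.2) with hmin | hmin
          · rw [hmin] at hxy; exact hxm (Or.inl hxy)
          · rw [hmin] at hxy; exact hxm (Or.inr hxy)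
        · rw [mergeR_of_not hxm, mergeR_of_not hym] at hxy
          exact hC x y hx hy hxy
    have hpers1 : ∀ x y, x < 25 → y < 25 → rootN p x = rootN p y →
        rootN (dsuStep p e) x = rootN (dsuStep p e) y := by
      intro x y hx hy h
      rw [hroot x hx, hroot y hy, h]
    have hEq1 : rootN (dsuStep p e) e.1 = rootN (dsuStep p e) e.2 := by
      rw [hroot e.1 ha, hroot e.2 hb, mergeR_of_mem (Or.inl rfl), mergeR_of_mem (Or.inr rfl)]
    obtain ⟨hIF, hCF, hpersF, hprocF⟩ :=
      ih (dsuStep p e) (fun e' he' => hE e' (List.mem_cons_of_mem e he')) hIp1 hC1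
    simp only [List.foldl_cons]
    refine ⟨hIF, hCF, ?_, ?_⟩
    · intro x y hx hy h
      exact hpersF x y hx hy (hpers1 x y hx hy h)
    · intro e' he'
      rcases List.mem_cons.mp he' with he' | he'
      · subst he'
        exact hpersF e'.1 e'.2 ha hb hEq1
      · exact hprocF e' he'

-- the initial parent list
theorem p0_getD (k : Nat) (hk : k < 25) :
    ((List.range 25).map (fun k => ((k : Nat) : Int))).getD k 0 = (k : Int) := by
  rw [List.getD_eq_getElem _ _ (by simpa using hk)]
  simp

theorem p0_inv : DsuInv ((List.range 25).map (fun k => ((k : Nat) : Int))) := by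
  refine ⟨by simp, fun k hk => ?_⟩
  rw [p0_getD k hk]
  simp

theorem p0_root (k : Nat) (hk : k < 25) :
    rootN ((List.range 25).map (fun k => ((k : Nat) : Int))) k = k :=
  rootN_of_fix _ k (p0_getD k hk)

theorem range25_map_cellD : (List.range 25).map cellD = cellScan := by decide

-- the class of a cell under the final DSU equals its component
theorem dsu_classes (arr : List (List Int)) :
    ∀ c : Fin 5 × Fin 5,
      Finset.univ.filter (fun d : Fin 5 × Fin 5 =>
        rootN ((edgeL arr).foldl dsuStep ((List.range 25).map (fun k => ((k : Nat) : Int)))) (idxC d)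
          = rootN ((edgeL arr).foldl dsuStep ((List.range 25).map (fun k => ((k : Nat) : Int)))) (idxC c))
        = pvCompB arr c := by
  set p0 : List Int := (List.range 25).map (fun k => ((k : Nat) : Int)) with hp0
  set pF := (edgeL arr).foldl dsuStep p0 with hpF
  have hC0 : ConnOK arr p0 := by
    intro x y hx hy hxy
    rw [p0_root x hx, p0_root y hy] at hxy
    subst hxy
    exact pvComp_self arr (cellD x)
  obtain ⟨hIF, hCF, _, hprocF⟩ := fold_edges arr (edgeL arr) p0 (edgeL_bounds arr) p0_inv hC0
  have hAdjCl : ∀ c n : Fin 5 × Fin 5, pvAdjB arr c n = true →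
      rootN pF (idxC c) = rootN pF (idxC n) := by
    intro c n hadj
    obtain ⟨hd, hv⟩ := (pvAdjB_iff arr c n).mp hadj
    rcases c with ⟨⟨i, hi⟩, ⟨j, hj⟩⟩
    rcases n with ⟨⟨i2, hi2⟩, ⟨j2, hj2⟩⟩
    have hvv : pvBGet arr i j = pvBGet arr i2 j2 := by
      rw [← pvValC_BGet arr i j hi hj, ← pvValC_BGet arr i2 j2 hi2 hj2]
      exact hv.symm
    simp only [pvDirsA, List.mem_cons, List.not_mem_nil, or_false, Prod.mk.injEq] at hd
    have hidx1 : idxC (⟨⟨i, hi⟩, ⟨j, hj⟩⟩ : Fin 5 × Fin 5) = 5 * i + j := rfl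
    have hidx2 : idxC (⟨⟨i2, hi2⟩, ⟨j2, hj2⟩⟩ : Fin 5 × Fin 5) = 5 * i2 + j2 := rfl
    rw [hidx1, hidx2]
    rcases hd with ⟨h1, h2⟩ | ⟨h1, h2⟩ | ⟨h1, h2⟩ | ⟨h1, h2⟩
    · -- (-1, 0): n is above c, so c is the down-neighbour of n
      have e1 : i = i2 + 1 := by omega
      have e2 : j2 = j := by omega
      rw [e1, ← e2] at hvv
      have := hprocF _ (mem_edgeL_down arr i2 j2 (by omega) hj2 hvv.symm)
      rw [show 5 * i + j = 5 * i2 + j2 + 5 by omega, show (5 * i2 + j2, 5 * i2 + j2 + 5).1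
        = 5 * i2 + j2 by rfl] at *
      exact this.symm
    · -- (0, 1): n is right of c
      have e1 : i2 = i := by omega
      have e2 : j2 = j + 1 := by omega
      rw [e1, e2] at hvv
      have := hprocF _ (mem_edgeL_right arr i j hi (by omega) hvv)
      rw [show 5 * i2 + j2 = 5 * i + j + 1 by omega]
      exact this
    · -- (1, 0): n is below c
      have e1 : i2 = i + 1 := by omega
      have e2 : j2 = j := by omega
      rw [e1, e2] at hvv
      have := hprocF _ (mem_edgeL_down arr i j (by omega) hj hvv)
      rw [show 5 * i2 + j2 = 5 * i + j + 5 by omega]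
      exact this
    · -- (0, -1): n is left of c
      have e1 : i2 = i := by omega
      have e2 : j = j2 + 1 := by omega
      rw [e1] at hvv
      rw [e2] at hvv
      have := hprocF _ (mem_edgeL_right arr i j2 hi (by omega) hvv.symm)
      rw [show 5 * i + j = 5 * i + j2 + 1 by omega, show 5 * i2 + j2 = 5 * i + j2 by omega]
      exact this.symm
  intro c
  apply Finset.Subset.antisymm
  · intro d hd
    obtain ⟨-, hd⟩ := Finset.mem_filter.mp hd
    have := hCF (idxC c) (idxC d) (idxC_lt c) (idxC_lt d) hd.symm
    rwa [cellD_idxC, cellD_idxC] at this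
  · apply pvComp_min arr
    · exact Finset.mem_filter.mpr ⟨Finset.mem_univ c, rfl⟩
    · intro d hd n hadj
      obtain ⟨-, hd⟩ := Finset.mem_filter.mp hd
      exact Finset.mem_filter.mpr ⟨Finset.mem_univ n, (hAdjCl d n hadj).symm.trans hd⟩

-- B's return value is the number of cells lying in components of size ≥ 3
theorem alt_eq_card (arr : List (List Int)) (clr : Int) :
    find_you_alt arr clr
      = (((Finset.univ.filter (fun c : Fin 5 × Fin 5 => 3 ≤ (pvCompB arr c).card)).card : Int)) := by
  set p0 : List Int := (List.range 25).map (fun k => ((k : Nat) : Int)) with hp0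
  set pF := (edgeL arr).foldl dsuStep p0 with hpF
  have hIF : DsuInv pF := by
    have hC0 : ConnOK arr p0 := by
      intro x y hx hy hxy
      rw [p0_root x hx, p0_root y hy] at hxy
      subst hxy
      exact pvComp_self arr (cellD x)
    exact (fold_edges arr (edgeL arr) p0 (edgeL_bounds arr) p0_inv hC0).1
  have hfind : ∀ k : Nat, k < 25 → dsuFind pF 25 ((k : Nat) : Int) = ((rootN pF k : Nat) : Int) :=
    fun k hk => dsuFind_eq pF hIF 25 k hk (by omega)
  have halt : find_you_alt arr clr
      = (((List.range 25).filter (fun k => 3 ≤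
          ((List.range 25).map (fun t => dsuFind pF 25 ((t : Nat) : Int))).count
            (((List.range 25).map (fun t => dsuFind pF 25 ((t : Nat) : Int))).getD k 0))).length : Int) := by
    show (((List.range 25).filter (fun k => 3 ≤
          ((List.range 25).map (fun t => dsuFind ((List.range 5).foldl _ p0) 25 ((t : Nat) : Int))).count
            (((List.range 25).map (fun t => dsuFind ((List.range 5).foldl _ p0) 25 ((t : Nat) : Int))).getD k 0))).length : Int) = _
    rw [pass_eq arr p0]
  rw [halt]
  set R := (List.range 25).map (fun t => dsuFind pF 25 ((t : Nat) : Int)) with hR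
  have hRget : ∀ k, k < 25 → R.getD k 0 = ((rootN pF k : Nat) : Int) := by
    intro k hk
    rw [hR, List.getD_eq_getElem _ _ (by simpa using hk)]
    simp only [List.getElem_map, List.getElem_range]
    exact hfind k hk
  have hcount : ∀ k, k < 25 → R.count ((rootN pF k : Nat) : Int) = (pvCompB arr (cellD k)).card := by
    intro k hk
    rw [hR, List.count_eq_countP, List.countP_map]
    have h1 : List.countP
          ((fun x => x == ((rootN pF k : Nat) : Int)) ∘ (fun t : Nat => dsuFind pF 25 ((t : Nat) : Int)))
          (List.range 25)
        = List.countP (fun d : Fin 5 × Fin 5 => decide (rootN pF (idxC d) = rootN pF k))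
            ((List.range 25).map cellD) := by
      rw [List.countP_map]
      apply List.countP_congr
      intro t ht
      have ht25 : t < 25 := List.mem_range.mp ht
      simp only [Function.comp_apply, hfind t ht25, idxC_cellD t ht25, beq_iff_eq,
        decide_eq_true_eq, Nat.cast_inj]
    rw [h1, range25_map_cellD, List.countP_eq_length_filter,
      ← card_filter_eq_scan (fun d => rootN pF (idxC d) = rootN pF k)]
    have hcl := dsu_classes arr (cellD k)
    rw [← hp0, ← hpF, idxC_cellD k hk] at hcl
    rw [hcl]
  have hfilt : (List.range 25).filter (fun k => 3 ≤ R.count (R.getD k 0))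
      = (List.range 25).filter (fun k => decide (3 ≤ (pvCompB arr (cellD k)).card)) := by
    apply List.filter_congr
    intro k hkmem
    have hk := List.mem_range.mp hkmem
    rw [hRget k hk, hcount k hk]
  rw [hfilt]
  have h2 : ((List.range 25).filter (fun k => decide (3 ≤ (pvCompB arr (cellD k)).card))).length
      = (Finset.univ.filter (fun c : Fin 5 × Fin 5 => 3 ≤ (pvCompB arr c).card)).card := by
    rw [card_filter_eq_scan, ← range25_map_cellD, List.filter_map, List.length_map]
    refine congrArg List.length (List.filter_congr ?_)
    intro x _
    simp only [Function.comp_apply]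
  rw [h2]

-- ===== VERDICT (by name: the statement is the Claim_ definition above) =====
theorem find_you_spec : Claim_equal_find_you := by
  unfold Claim_equal_find_you
  intro arr clr hDom hPre
  unfold Spec_find_you
  rw [A_eq_card arr clr hPre, alt_eq_card arr clr]
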